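-- pv_equiv track=rewrite | github.com/NCBI-Codeathons/amr-2024-team-nguyen | correlation_analysis/getCorrelsByGene.py | getGIDLst
-- ===== SOURCE A (Python) =====
-- def getGIDLst(genHsh, phnHsh):
-- 	gid = {}
-- 	for i in genHsh:
-- 		gid[i] = 1
-- 	for i in phnHsh:
-- 		if i not in gid:
-- 			gid[i] = 0
-- 		gid[i] += 1
--
-- 	dLst = []
-- 	for i in gid:
-- 		if gid[i] < 2:
-- 			dLst.append(i)
--
-- 	for i in dLst:
-- 		del gid[i]
--
-- 	return list(sorted(gid))
-- ===== SOURCE B (Python) =====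
-- def getGIDLst(genHsh, phnHsh):
-- 	return sorted(set(genHsh) & set(phnHsh))
-- ===== Notes on version B (the rewrite author's own statement) =====
-- stated objective: simpler
-- what changed: Replaces the four passes (count each key, collect keys with count < 2, delete them, sort the survivors) with a single set-intersection of the two key sets followed by one sorted() call; no per-key counts or deletion list are maintained.
import Mathlib
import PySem

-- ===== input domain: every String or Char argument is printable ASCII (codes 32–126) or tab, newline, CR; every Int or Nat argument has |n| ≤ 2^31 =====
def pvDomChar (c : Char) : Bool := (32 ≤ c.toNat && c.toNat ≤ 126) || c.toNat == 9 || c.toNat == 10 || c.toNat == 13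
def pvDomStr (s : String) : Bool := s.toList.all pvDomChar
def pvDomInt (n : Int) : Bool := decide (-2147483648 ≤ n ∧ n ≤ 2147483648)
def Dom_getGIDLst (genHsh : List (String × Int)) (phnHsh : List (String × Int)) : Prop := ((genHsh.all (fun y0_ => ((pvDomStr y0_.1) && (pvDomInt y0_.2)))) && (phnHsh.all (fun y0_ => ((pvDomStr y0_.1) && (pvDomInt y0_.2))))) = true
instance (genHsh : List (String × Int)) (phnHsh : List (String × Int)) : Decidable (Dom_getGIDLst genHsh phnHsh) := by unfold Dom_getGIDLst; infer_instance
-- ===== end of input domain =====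

-- B replaces A's four passes (count keys, collect count<2, delete, sort) by one
-- set intersection of the key sets plus one sorted() call (objective: simpler).

-- ===== PORT A =====
-- genHsh/phnHsh are Python dicts (assoc lists here); 'for i in genHsh' iterates the dict's keys.
def getGIDLst (genHsh : List (String × Int)) (phnHsh : List (String × Int)) : List String :=
  -- gid = {}; for i in genHsh: gid[i] = 1
  let gid : PySem.Dict String Int :=
    (PySem.Dict.ofList genHsh).keys.foldl (fun d i => d.insert i 1) PySem.Dict.empty
  -- for i in phnHsh: if i not in gid: gid[i] = 0; gid[i] += 1
  -- (the read gid[i] never raises: the key i was just ensured present, so getD is exact)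
  let gid : PySem.Dict String Int :=
    (PySem.Dict.ofList phnHsh).keys.foldl (fun d i =>
      let d' := if d.contains i then d else d.insert i 0
      d'.insert i (d'.getD i 0 + 1)) gid
  -- dLst = []; for i in gid: if gid[i] < 2: dLst.append(i)   (i ∈ gid, so gid[i] never raises)
  let dLst : List String :=
    gid.keys.foldl (fun acc i => if gid.getD i 0 < 2 then acc ++ [i] else acc) []
  -- for i in dLst: del gid[i]   (every i of dLst is a key of gid, so del never raises)
  let gid := dLst.foldl (fun d i => d.erase i) gid
  -- return list(sorted(gid))
  PySem.List.sorted gid.keys (fun x => x) false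

-- ===== PORT B =====
-- return sorted(set(genHsh) & set(phnHsh))   (set of a dict = its key set)
def getGIDLst_alt (genHsh : List (String × Int)) (phnHsh : List (String × Int)) : List String :=
  PySem.List.sorted
    (PySem.Set.inter (PySem.Set.ofList (genHsh.map (·.1))) (PySem.Set.ofList (phnHsh.map (·.1))))
    (fun x => x) false

-- ===== PRECONDITION & SPEC =====
def Spec_getGIDLst (genHsh : List (String × Int)) (phnHsh : List (String × Int)) (out : List String) : Prop := out = getGIDLst_alt genHsh phnHsh
instance (genHsh : List (String × Int)) (phnHsh : List (String × Int)) (out : List String) : Decidable (Spec_getGIDLst genHsh phnHsh out) := by unfold Spec_getGIDLst; infer_instance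

-- ===== CLAIM (what is proved, stated in full; the proofs are below) =====
def Claim_equal_getGIDLst : Prop := ∀ (genHsh : List (String × Int)) (phnHsh : List (String × Int)), Dom_getGIDLst genHsh phnHsh → Spec_getGIDLst genHsh phnHsh (getGIDLst genHsh phnHsh)

-- ===== LEMMAS AND PROOFS =====

-- proof-only names for A's four stages (not used by the ports or the claim)
def pvGid1 (genHsh : List (String × Int)) : PySem.Dict String Int :=
  (PySem.Dict.ofList genHsh).keys.foldl (fun d i => d.insert i 1) PySem.Dict.empty

def pvGid2 (genHsh phnHsh : List (String × Int)) : PySem.Dict String Int :=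
  (PySem.Dict.ofList phnHsh).keys.foldl (fun d i =>
    let d' := if d.contains i then d else d.insert i 0
    d'.insert i (d'.getD i 0 + 1)) (pvGid1 genHsh)

def pvDLst (genHsh phnHsh : List (String × Int)) : List String :=
  (pvGid2 genHsh phnHsh).keys.foldl
    (fun acc i => if (pvGid2 genHsh phnHsh).getD i 0 < 2 then acc ++ [i] else acc) []

def pvGid3 (genHsh phnHsh : List (String × Int)) : PySem.Dict String Int :=
  (pvDLst genHsh phnHsh).foldl (fun d i => d.erase i) (pvGid2 genHsh phnHsh)

theorem getGIDLst_eq_stages (genHsh phnHsh : List (String × Int)) :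
    getGIDLst genHsh phnHsh =
      PySem.List.sorted (pvGid3 genHsh phnHsh).keys (fun x => x) false := rfl

theorem keys_ofList_eq {κ ν : Type} [BEq κ] [LawfulBEq κ] (ps : List (κ × ν)) :
    (PySem.Dict.ofList ps).keys = PySem.Set.ofList (ps.map (·.1)) := by
  show ((ps.foldl (fun d p => d.insert p.1 p.2) PySem.Dict.empty)).keys = _
  rw [PySem.Dict.keys_foldl_insert_key (key := Prod.fst) (f := fun _ p => p.2)]
  simp [PySem.Dict.keys_empty, PySem.Set.update_nil_left]

theorem keys_erase_eq {κ ν : Type} [BEq κ] (d : PySem.Dict κ ν) (k : κ) :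
    (d.erase k).keys = d.keys.filter (fun x => !(x == k)) := by
  simp only [PySem.Dict.erase, PySem.Dict.keys, List.filter_map]
  rfl

theorem mem_keys_erase {κ ν : Type} [BEq κ] [LawfulBEq κ] (d : PySem.Dict κ ν) (k x : κ) :
    x ∈ (d.erase k).keys ↔ x ∈ d.keys ∧ x ≠ k := by
  simp [keys_erase_eq]

theorem mem_keys_foldl_erase {κ ν : Type} [BEq κ] [LawfulBEq κ]
    (l : List κ) (d : PySem.Dict κ ν) (x : κ) :
    x ∈ (l.foldl (fun d i => d.erase i) d).keys ↔ x ∈ d.keys ∧ x ∉ l := by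
  induction l generalizing d with
  | nil => simp
  | cons h t ih =>
      simp only [List.foldl_cons, ih, mem_keys_erase, List.mem_cons]
      tauto

theorem nodup_keys_foldl_erase {κ ν : Type} [BEq κ] (l : List κ) (d : PySem.Dict κ ν)
    (h : d.keys.Nodup) : (l.foldl (fun d i => d.erase i) d).keys.Nodup := by
  induction l generalizing d with
  | nil => exact h
  | cons a t ih =>
      exact ih _ (by rw [keys_erase_eq]; exact h.filter _)

theorem getD_foldl_insert_one {κ : Type} [BEq κ] [LawfulBEq κ] [DecidableEq κ]
    (l : List κ) (d : PySem.Dict κ Int) (k : κ) :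
    (l.foldl (fun d i => d.insert i 1) d).getD k 0 =
      if k ∈ l then 1 else d.getD k 0 := by
  induction l generalizing d with
  | nil => simp
  | cons a t ih =>
      simp only [List.foldl_cons, ih, PySem.Dict.getD_insert, List.mem_cons]
      by_cases hk : k ∈ t <;> by_cases ha : k = a <;> simp [hk, ha]

theorem second_loop_body_eq {κ : Type} [BEq κ] [LawfulBEq κ] (d : PySem.Dict κ Int) (i : κ) :
    (let d' := if d.contains i then d else d.insert i 0
     d'.insert i (d'.getD i 0 + 1)) = d.insert i (d.getD i 0 + 1) := by
  by_cases h : d.contains i = true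
  · simp [h]
  · simp only [Bool.not_eq_true] at h
    simp [h, PySem.Dict.getD_insert_self, PySem.Dict.insert_insert_self,
      PySem.Dict.getD_of_not_contains d 0 h]

theorem gid1_keys (genHsh : List (String × Int)) :
    (pvGid1 genHsh).keys = (PySem.Dict.ofList genHsh).keys := by
  unfold pvGid1
  rw [PySem.Dict.keys_foldl_insert _ (fun _ _ => (1 : Int))]
  rw [keys_ofList_eq]
  simp [PySem.Dict.keys_empty, PySem.Set.update_nil_left, PySem.Set.ofList_ofList]

theorem gid1_nodup (genHsh : List (String × Int)) : (pvGid1 genHsh).keys.Nodup := by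
  rw [gid1_keys, keys_ofList_eq]; exact PySem.Set.nodup_ofList _

theorem gid1_getD (genHsh : List (String × Int)) (k : String) :
    (pvGid1 genHsh).getD k 0 = if k ∈ (PySem.Dict.ofList genHsh).keys then 1 else 0 := by
  unfold pvGid1
  rw [getD_foldl_insert_one]
  by_cases h : k ∈ (PySem.Dict.ofList genHsh).keys <;> simp [h, PySem.Dict.getD_empty]

theorem gid2_eq_counting (genHsh phnHsh : List (String × Int)) :
    pvGid2 genHsh phnHsh = (PySem.Dict.ofList phnHsh).keys.foldl
      (fun d i => d.insert i (d.getD i 0 + 1)) (pvGid1 genHsh) := by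
  unfold pvGid2
  exact PySem.List.foldl_congr_mem _ _ _ _ (fun d i _ => second_loop_body_eq d i)

theorem gid2_mem_keys (genHsh phnHsh : List (String × Int)) (k : String) :
    k ∈ (pvGid2 genHsh phnHsh).keys ↔
      k ∈ (PySem.Dict.ofList genHsh).keys ∨ k ∈ (PySem.Dict.ofList phnHsh).keys := by
  rw [gid2_eq_counting, PySem.Dict.keys_foldl_insert _ (fun d i => d.getD i 0 + 1),
    PySem.Set.mem_update, gid1_keys]

theorem gid2_nodup (genHsh phnHsh : List (String × Int)) :
    (pvGid2 genHsh phnHsh).keys.Nodup := by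
  rw [gid2_eq_counting]
  exact PySem.Dict.nodup_keys_foldl_insert _ _ _ (gid1_nodup genHsh)

theorem gid2_getD (genHsh phnHsh : List (String × Int)) (k : String) :
    (pvGid2 genHsh phnHsh).getD k 0 =
      (if k ∈ (PySem.Dict.ofList genHsh).keys then 1 else 0) +
      (if k ∈ (PySem.Dict.ofList phnHsh).keys then 1 else 0) := by
  rw [gid2_eq_counting, PySem.Dict.getD_foldl_insert_add_one, gid1_getD]
  have hnd : (PySem.Dict.ofList phnHsh).keys.Nodup := by
    rw [keys_ofList_eq]; exact PySem.Set.nodup_ofList _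
  by_cases h : k ∈ (PySem.Dict.ofList phnHsh).keys
  · rw [List.count_eq_one_of_mem hnd h]; simp [h]
  · simp [h, List.count_eq_zero.mpr h]

theorem gid3_mem_keys (genHsh phnHsh : List (String × Int)) (x : String) :
    x ∈ (pvGid3 genHsh phnHsh).keys ↔
      x ∈ genHsh.map (·.1) ∧ x ∈ phnHsh.map (·.1) := by
  have hdLst : pvDLst genHsh phnHsh = (pvGid2 genHsh phnHsh).keys.filter
      (fun i => decide ((pvGid2 genHsh phnHsh).getD i 0 < 2)) := by
    unfold pvDLst
    rw [PySem.List.foldl_append_ite_eq_filter]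
    simp
  unfold pvGid3
  rw [mem_keys_foldl_erase, hdLst]
  simp only [List.mem_filter, decide_eq_true_eq, gid2_mem_keys, gid2_getD]
  have hgen : x ∈ (PySem.Dict.ofList genHsh).keys ↔ x ∈ genHsh.map (·.1) := by
    rw [keys_ofList_eq]; exact PySem.Set.mem_ofList _ _
  have hphn : x ∈ (PySem.Dict.ofList phnHsh).keys ↔ x ∈ phnHsh.map (·.1) := by
    rw [keys_ofList_eq]; exact PySem.Set.mem_ofList _ _
  rw [← hgen, ← hphn]
  by_cases hg : x ∈ (PySem.Dict.ofList genHsh).keys <;>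
    by_cases hp : x ∈ (PySem.Dict.ofList phnHsh).keys <;> simp [hg, hp]

-- ===== VERDICT (by name: the statement is the Claim_ definition above) =====
theorem getGIDLst_spec : Claim_equal_getGIDLst := by
  intro genHsh phnHsh _
  show getGIDLst genHsh phnHsh = getGIDLst_alt genHsh phnHsh
  rw [getGIDLst_eq_stages]
  unfold getGIDLst_alt
  rw [PySem.List.sorted_id_eq_sorted_id_iff_perm]
  apply (List.perm_ext_iff_of_nodup ?_ ?_).2
  · intro x
    rw [gid3_mem_keys genHsh phnHsh x, PySem.Set.mem_inter]
    simp [PySem.Set.mem_ofList]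
  · exact nodup_keys_foldl_erase _ _ (gid2_nodup genHsh phnHsh)
  · exact PySem.Set.nodup_inter _ _ (PySem.Set.nodup_ofList _)
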